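-- pv_equiv track=rewrite | github.com/JocelynMira/algos_assignments | arrays_to_do_1.py | heights
-- ===== SOURCE A (Python) =====
-- def heights(list):
--     # create empty list to add all visible buildings
--     visible = []
--     # iterate through list
--     for i in list:
--         # if there isnt anything in the list,
--         if len(visible) == 0:
--             # and building is above ground (i > 0),
--             if i > 0:
--                 # append building in visible list
--                 visible.append(i)
--         # if there are buildings in visible list,
--         if len(visible) > 0:
--             # if building is above ground and not in visible list,
--             if i > 0 and i not in visible:
--                 # if building is taller than the last listed
--                 if i > visible[-1]:
--                     # add to list
--                     visible.append(i)
--     return visible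
-- ===== SOURCE B (Python) =====
-- def heights(list):
--     # Pass 1: prefix-maximum table (max of 0 and all strictly-previous elements).
--     maxes = []
--     m = 0
--     for x in list:
--         maxes.append(m)
--         m = max(m, x)
--     # Pass 2: keep exactly the elements that beat every previous one (and 0).
--     return [x for x, m in zip(list, maxes) if x > m]
-- ===== Notes on version B (the rewrite author's own statement) =====
-- stated objective: faster
-- what changed: Replaces the incremental visible-list with its O(k) membership test and last-element comparison by a prefix-maximum table built in one pass followed by a filter; the 0 sentinel folds the positivity test into the comparison.
import Mathlib
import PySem

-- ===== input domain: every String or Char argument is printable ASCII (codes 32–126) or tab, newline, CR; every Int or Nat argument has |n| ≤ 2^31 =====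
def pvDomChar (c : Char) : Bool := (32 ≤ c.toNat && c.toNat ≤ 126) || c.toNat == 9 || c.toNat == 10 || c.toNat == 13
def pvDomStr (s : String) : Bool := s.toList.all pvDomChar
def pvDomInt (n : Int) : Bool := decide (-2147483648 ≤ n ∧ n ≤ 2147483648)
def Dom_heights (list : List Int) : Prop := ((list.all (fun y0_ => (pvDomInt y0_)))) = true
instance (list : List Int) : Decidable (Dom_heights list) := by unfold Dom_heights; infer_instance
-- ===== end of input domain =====

-- B replaces A's incremental visible-list (membership test + last element) by a
-- prefix-maximum table plus a filter: simpler, two plain passes.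

-- ===== PORT A =====
-- one body of A's for-loop: the two sequential 'if' statements on 'visible'
def heightsStep (visible : List Int) (i : Int) : List Int :=
  let visible :=
    if visible.length = 0 then
      (if i > 0 then visible ++ [i] else visible)
    else visible
  if visible.length > 0 then
    if i > 0 ∧ ¬ visible.contains i then
      match PySem.List.pyGet? visible (-1) with
      | some last => if i > last then visible ++ [i] else visible
      | none => visible   -- unreachable: visible is nonempty here
    else visible
  else visible

def heights (list : List Int) : List Int := list.foldl heightsStep []

-- ===== PORT B =====
-- pass 1 of Source B: build the prefix-maximum table (state = (maxes, m))
def heightsMaxes (list : List Int) : List Int :=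
  (list.foldl (fun (p : List Int × Int) x => (p.1 ++ [p.2], max p.2 x)) ([], 0)).1

def heights_alt (list : List Int) : List Int :=
  ((list.zip (heightsMaxes list)).filter (fun p => p.1 > p.2)).map Prod.fst

-- ===== PRECONDITION & SPEC =====
def Spec_heights (list : List Int) (out : List Int) : Prop := out = heights_alt list
instance (list : List Int) (out : List Int) : Decidable (Spec_heights list out) := by unfold Spec_heights; infer_instance

-- ===== CLAIM (what is proved, stated in full; the proofs are below) =====
def Claim_equal_heights : Prop := ∀ (list : List Int), Dom_heights list → Spec_heights list (heights list)

-- ===== LEMMAS AND PROOFS =====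

-- reference recursion: strictly-increasing filter with running max m
def bFilter (m : Int) : List Int → List Int
  | [] => []
  | x :: xs => if m < x then x :: bFilter (max m x) xs else bFilter (max m x) xs

-- the invariant A's loop maintains about (visible, m = max of 0 and prefix)
def HInv (v : List Int) (m : Int) : Prop :=
  (v = [] → m = 0) ∧ (v ≠ [] → v.getLast? = some m ∧ 0 < m) ∧ ∀ x ∈ v, x ≤ m

theorem heightsStep_eq (v : List Int) (m i : Int) (h : HInv v m) :
    heightsStep v i = if m < i then v ++ [i] else v := by
  obtain ⟨h0, h1, h2⟩ := h
  unfold heightsStep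
  by_cases hv : v = []
  · subst hv
    have hm := h0 rfl
    subst hm
    by_cases hi : i > 0
    · simp [hi]
    · simp [hi]
  · have hne : v.length ≠ 0 := by simpa [List.length_eq_zero_iff] using hv
    obtain ⟨hlast, hpos⟩ := h1 hv
    simp only [if_neg hne]
    have hlen : v.length > 0 := Nat.pos_of_ne_zero hne
    rw [if_pos hlen, PySem.List.pyGet?_neg_one, hlast]
    by_cases hmi : m < i
    · have hipos : i > 0 := by omega
      have hnotin : ¬ v.contains i := by
        simp only [List.contains_eq_mem, decide_eq_true_eq]
        intro hin
        exact absurd (h2 i hin) (by omega)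
      rw [if_pos ⟨hipos, hnotin⟩, if_pos hmi]
      show (if i > m then v ++ [i] else v) = v ++ [i]
      simp [hmi]
    · rw [if_neg hmi]
      by_cases hc : i > 0 ∧ ¬ v.contains i
      · rw [if_pos hc]
        show (if i > m then v ++ [i] else v) = v
        simp [hmi]
      · rw [if_neg hc]

theorem HInv_step (v : List Int) (m i : Int) (h : HInv v m) :
    HInv (if m < i then v ++ [i] else v) (max m i) := by
  obtain ⟨h0, h1, h2⟩ := h
  by_cases hmi : m < i
  · rw [if_pos hmi]
    have hmax : max m i = i := by omega
    rw [hmax]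
    refine ⟨by simp, fun _ => ⟨by simp, ?_⟩, ?_⟩
    · by_cases hv : v = []
      · have := h0 hv; omega
      · have := (h1 hv).2; omega
    · intro x hx
      rcases List.mem_append.mp hx with hx | hx
      · have := h2 x hx; omega
      · simp at hx; omega
  · rw [if_neg hmi]
    have hmax : max m i = m := by omega
    rw [hmax]
    exact ⟨h0, h1, h2⟩

-- A's fold, from any state satisfying the invariant, appends exactly bFilter m l
theorem foldA_eq (l : List Int) : ∀ (v : List Int) (m : Int), HInv v m →
    l.foldl heightsStep v = v ++ bFilter m l := by
  induction l with
  | nil => intro v m _; simp [bFilter]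
  | cons x xs ih =>
    intro v m h
    simp only [List.foldl_cons]
    rw [heightsStep_eq v m x h]
    have h' := HInv_step v m x h
    by_cases hmx : m < x
    · rw [if_pos hmx] at h' ⊢
      rw [ih _ _ h']
      simp [bFilter, hmx]
    · rw [if_neg hmx] at h' ⊢
      rw [ih _ _ h']
      simp [bFilter, hmx]

-- B-side: the prefix-max table, recursively
def maxesList (m : Int) : List Int → List Int
  | [] => []
  | x :: xs => m :: maxesList (max m x) xs

theorem heightsMaxes_fold (l : List Int) : ∀ (acc : List Int) (m : Int),
    (l.foldl (fun (p : List Int × Int) x => (p.1 ++ [p.2], max p.2 x)) (acc, m)).1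
      = acc ++ maxesList m l := by
  induction l with
  | nil => intro acc m; simp [maxesList]
  | cons x xs ih =>
    intro acc m
    simp only [List.foldl_cons]
    rw [ih]
    simp [maxesList]

theorem zip_filter_eq (l : List Int) : ∀ (m : Int),
    ((l.zip (maxesList m l)).filter (fun p => p.1 > p.2)).map Prod.fst = bFilter m l := by
  induction l with
  | nil => intro m; simp [maxesList, bFilter]
  | cons x xs ih =>
    intro m
    simp only [maxesList, List.zip_cons_cons, List.filter_cons, bFilter]
    by_cases hmx : m < x
    · simp only [show ((x, m).1 > (x, m).2) = True by simp [hmx], decide_true, ]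
      simp [ih]
    · simp only [show ¬ ((x, m).1 > (x, m).2) by simpa using hmx]
      simp [ih]

theorem heights_alt_eq (l : List Int) : heights_alt l = bFilter 0 l := by
  unfold heights_alt heightsMaxes
  rw [heightsMaxes_fold l [] 0, List.nil_append, zip_filter_eq]

-- ===== VERDICT (by name: the statement is the Claim_ definition above) =====
theorem heights_spec : Claim_equal_heights := by
  intro l _
  unfold Spec_heights heights
  rw [foldA_eq l [] 0 ⟨fun _ => rfl, fun h => absurd rfl h, by simp⟩, heights_alt_eq]
  simp
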